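-- pv_equiv track=rewrite | github.com/Shevone/ABOBA | lab7/lab7.py | number_count
-- ===== SOURCE A (Python) =====
-- def number_count(n, count=0):
--     """"Количество цифр в строке"""
--     # Задача 113654
--     if len(n) == 0:
--         return count
--     elif not (str(n)[len(n) - 1].isdigit()):
--         return number_count(n[:len(n) - 1], count)
--     else:
--         count += 1
--         return number_count(n[:len(n) - 1], count)
-- ===== SOURCE B (Python) =====
-- def number_count(n, count=0):
--     for ch in str(n):
--         if ch.isdigit():
--             count += 1
--     return count
-- ===== Notes on version B (the rewrite author's own statement) =====
-- stated objective: faster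
-- what changed: Replaces the end-peeling recursion (slicing off the last character each call) with a single forward for-loop over the string that increments the accumulator on digit characters.
import Mathlib
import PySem

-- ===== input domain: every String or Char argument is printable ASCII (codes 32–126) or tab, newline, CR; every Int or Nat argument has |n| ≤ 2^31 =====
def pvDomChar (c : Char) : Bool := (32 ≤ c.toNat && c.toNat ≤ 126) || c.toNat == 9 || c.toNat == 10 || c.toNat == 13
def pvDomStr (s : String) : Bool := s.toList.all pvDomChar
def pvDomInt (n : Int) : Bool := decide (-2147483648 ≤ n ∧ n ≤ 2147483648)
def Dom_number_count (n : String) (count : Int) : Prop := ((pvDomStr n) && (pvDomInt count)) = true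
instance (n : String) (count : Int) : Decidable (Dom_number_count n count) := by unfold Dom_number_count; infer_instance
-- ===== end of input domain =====

-- B replaces A's end-peeling recursion with one forward loop over the characters (idiomatic).

-- ===== PORT A =====
-- A recurses, testing the LAST character and recursing on n[:len(n)-1]; ported on the char list.
def numberCountAGo (l : List Char) (count : Int) : Int :=
  if h : l.length = 0 then count
  else
    have hne : l ≠ [] := by intro hn; exact h (by simp [hn])
    if ¬ (PySem.Chars.isdigit (l.getLast hne) = true) then
      numberCountAGo l.dropLast count
    else
      numberCountAGo l.dropLast (count + 1)
termination_by l.length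
decreasing_by all_goals (simp [List.length_dropLast]; omega)

def number_count (n : String) (count : Int) : Int := numberCountAGo n.toList count

-- ===== PORT B =====
def number_count_alt (n : String) (count : Int) : Int :=
  n.toList.foldl (fun acc ch => if PySem.Chars.isdigit ch then acc + 1 else acc) count

-- ===== PRECONDITION & SPEC =====
def Spec_number_count (n : String) (count : Int) (out : Int) : Prop := out = number_count_alt n count
instance (n : String) (count : Int) (out : Int) : Decidable (Spec_number_count n count out) := by unfold Spec_number_count; infer_instance

-- ===== CLAIM (what is proved, stated in full; the proofs are below) =====
def Claim_equal_number_count : Prop := ∀ (n : String) (count : Int), Dom_number_count n count → Spec_number_count n count (number_count n count)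

-- ===== LEMMAS AND PROOFS =====
theorem numberCountAGo_eq (l : List Char) : ∀ count : Int,
    numberCountAGo l count = count + (l.countP PySem.Chars.isdigit : Int) := by
  induction l using List.reverseRecOn with
  | nil => intro count; simp [numberCountAGo]
  | append_singleton l a ih =>
    intro count
    rw [numberCountAGo]
    have hne : (l ++ [a]).length ≠ 0 := by simp
    simp only [hne, List.getLast_append, List.dropLast_concat, ih,
      List.countP_append, List.countP_cons, List.countP_nil]
    by_cases hd : PySem.Chars.isdigit a = true <;> simp [hd] <;> ring

-- ===== VERDICT (by name: the statement is the Claim_ definition above) =====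
theorem number_count_spec : Claim_equal_number_count := by
  intro n count _
  unfold Spec_number_count number_count number_count_alt
  rw [numberCountAGo_eq, PySem.List.foldl_if_add_one]
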